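-- pv_equiv track=rewrite | github.com/AbdallahZein12/Python- | contact_card.py | add_dashes
-- ===== SOURCE A (Python) =====
-- def add_dashes(string):
--   result = list(string)
--   i = 3
--   counter = 0
--   while i < len(result):
--     counter += 1
--     result.insert(i, '-')
--     i += 4
--     if counter == 2:
--       break
--   return "".join(result)
-- ===== SOURCE B (Python) =====
-- def add_dashes(string):
--     return "-".join(filter(None, (string[:3], string[3:6], string[6:])))
-- ===== Notes on version B (the rewrite author's own statement) =====
-- stated objective: simpler
-- what changed: Replaces the mutate-a-list loop (list.insert with a moving index and a counter, then join of the char list) by a closed-form split into the three slices string[:3], string[3:6], string[6:], dropping empty slices and joining with dashes.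
import Mathlib
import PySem

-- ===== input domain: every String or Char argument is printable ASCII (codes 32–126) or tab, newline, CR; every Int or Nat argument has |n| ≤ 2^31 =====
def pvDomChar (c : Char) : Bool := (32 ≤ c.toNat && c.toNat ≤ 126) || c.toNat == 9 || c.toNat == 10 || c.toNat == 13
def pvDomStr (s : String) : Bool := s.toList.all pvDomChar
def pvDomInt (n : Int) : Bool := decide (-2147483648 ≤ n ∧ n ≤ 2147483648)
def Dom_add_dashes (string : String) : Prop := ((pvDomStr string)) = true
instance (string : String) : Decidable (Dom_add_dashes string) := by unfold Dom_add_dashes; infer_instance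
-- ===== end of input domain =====

-- B replaces A's mutate-a-list insert loop by a closed-form slice-into-groups-and-join (objective: simpler).

-- ===== PORT A =====
-- the while loop of A: state (result, i, counter); i stays ≥ 0 (it starts at 3 and grows)
def add_dashes_loop (result : List Char) (i : Int) (counter : Int) : List Char :=
  if h : i < (result.length : Int) then
    let counter' := counter + 1
    let result' := PySem.List.insert result i '-'
    if counter' = 2 then result'
    else add_dashes_loop result' (i + 4) counter'
  else result
termination_by ((result.length : Int) - i).toNat
decreasing_by
  simp [PySem.List.length_insert]
  omega

def add_dashes (string : String) : String :=
  String.ofList (add_dashes_loop string.toList 3 0)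

-- ===== PORT B =====
def add_dashes_alt (string : String) : String :=
  let cs := string.toList
  let groups := [PySem.List.slice cs none (some 3),
                 PySem.List.slice cs (some 3) (some 6),
                 PySem.List.slice cs (some 6) none]
  String.ofList (PySem.Chars.join ['-'] (groups.filter (· ≠ [])))

-- ===== PRECONDITION & SPEC =====
def Spec_add_dashes (string : String) (out : String) : Prop := out = add_dashes_alt string
instance (string : String) (out : String) : Decidable (Spec_add_dashes string out) := by unfold Spec_add_dashes; infer_instance

-- ===== CLAIM (what is proved, stated in full; the proofs are below) =====
def Claim_equal_add_dashes : Prop := ∀ (string : String), Dom_add_dashes string → Spec_add_dashes string (add_dashes string)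

-- ===== LEMMAS AND PROOFS =====

lemma add_dashes_lists (cs : List Char) :
    add_dashes_loop cs 3 0 =
      PySem.Chars.join ['-']
        (([PySem.List.slice cs none (some 3),
           PySem.List.slice cs (some 3) (some 6),
           PySem.List.slice cs (some 6) none]).filter (· ≠ [])) := by
  match cs with
  | [] =>
    simp [add_dashes_loop, PySem.List.slice, PySem.List.clampIdx, PySem.Chars.join, List.intercalate]
  | [a] =>
    simp [add_dashes_loop, PySem.List.slice, PySem.List.clampIdx, PySem.Chars.join, List.intercalate]
  | [a, b] =>
    simp [add_dashes_loop, PySem.List.slice, PySem.List.clampIdx, PySem.Chars.join, List.intercalate]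
  | [a, b, c] =>
    simp [add_dashes_loop, PySem.List.slice, PySem.List.clampIdx, PySem.Chars.join, List.intercalate]
  | [a, b, c, d] =>
    simp [add_dashes_loop, PySem.List.insert, PySem.List.clampIdx, PySem.List.slice, PySem.List.sliceIndices,
      PySem.Chars.join, List.filter, List.intercalate]
  | [a, b, c, d, e] =>
    simp [add_dashes_loop, PySem.List.insert, PySem.List.clampIdx, PySem.List.slice, PySem.List.sliceIndices,
      PySem.Chars.join, List.filter, List.intercalate]
  | [a, b, c, d, e, f] =>
    simp [add_dashes_loop, PySem.List.insert, PySem.List.clampIdx, PySem.List.slice, PySem.List.sliceIndices,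
      PySem.Chars.join, List.filter, List.intercalate]
  | a :: b :: c :: d :: e :: f :: g :: t =>
    rw [add_dashes_loop, dif_pos (by simp; omega)]
    simp only
    rw [if_neg (by decide)]
    rw [add_dashes_loop]
    rw [dif_pos (by simp [PySem.List.insert]; omega)]
    have h3 : min (3 : Int) ((t.length : Int) + 1 + 1 + 1 + 1 + 1 + 1 + 1) = 3 := by omega
    have h7 : min (7 : Int) ((t.length : Int) + 1 + 1 + 1 + 1 + 1 + 1 + 1 + 1) = 7 := by omega
    simp [PySem.List.insert, PySem.List.clampIdx, PySem.List.slice, PySem.List.sliceIndices,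
      PySem.Chars.join, List.filter, List.intercalate, h3, h7]

-- ===== VERDICT (by name: the statement is the Claim_ definition above) =====
theorem add_dashes_spec : Claim_equal_add_dashes := by
  intro s _
  unfold Spec_add_dashes add_dashes add_dashes_alt
  simp only
  rw [add_dashes_lists]
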